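-- pv_equiv track=rewrite | github.com/cookfisher/S-Puzzle | test.py | heuristic2
-- ===== SOURCE A (Python) =====
-- class Position:
--     def __init__(self, character, row, column):
--         self.character = character
--         self.row = row
--         self.column = column
--
-- def matrixToPosition(puzzle):
--     poslist = []
--     rows = len(puzzle)
--     columns = len(puzzle[0])
--
--     for row in range(rows):
--         for column in range(columns):
--             character = puzzle[row][column]
--             temp = Position(character, row, column)
--             poslist.append(temp)
--
--     return poslist
--
-- def heuristic2(openlist):
--     index = 0
--     min_sum = 10000
--
--     for node in openlist:
--         #puzzle = node.puzzle
--         puzzle_poslist = matrixToPosition(node)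
--         sum = 0
--
--         for element_current in puzzle_poslist:
--             char_current = element_current.character
--             for element_next in puzzle_poslist:
--                 char_next = element_next.character
--                 if puzzle_poslist.index(element_next) > puzzle_poslist.index(element_current) and char_current > char_next:
--                     sum += 1
--
--         if min_sum > sum:
--             min_sum = sum
--             index = openlist.index(node)
--
--     return index
-- ===== SOURCE B (Python) =====
-- def _insert_count(seen, x):
--     """Insert x into the ascending-sorted list seen; return (new list, #elements > x)."""
--     for k, y in enumerate(seen):
--         if y > x:
--             return seen[:k] + [x] + seen[k:], len(seen) - k
--     return seen + [x], 0
--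
-- def heuristic2(openlist):
--     index = 0
--     min_sum = 10000
--     for i, node in enumerate(openlist):
--         width = len(node[0])  # the puzzle width is defined by the first row
--         inv = 0
--         seen = []  # sorted ascending multiset of the cells scanned so far
--         for row in node:
--             for c in range(width):
--                 seen, greater = _insert_count(seen, row[c])
--                 inv += greater
--         if inv < min_sum:
--             min_sum = inv
--             index = i
--     return index
-- ===== Notes on version B (the rewrite author's own statement) =====
-- stated objective: faster
-- what changed: B drops the Position list and the O(n) list.index scans entirely: per node it reads the width-truncated rows once, maintaining an ascending sorted list of already-seen cells and counting, for each new cell, how many previously seen cells are greater (an online insertion inversion count), and tracks the arg-min index with an enumerate counter instead of openlist.index.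
import Mathlib
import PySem

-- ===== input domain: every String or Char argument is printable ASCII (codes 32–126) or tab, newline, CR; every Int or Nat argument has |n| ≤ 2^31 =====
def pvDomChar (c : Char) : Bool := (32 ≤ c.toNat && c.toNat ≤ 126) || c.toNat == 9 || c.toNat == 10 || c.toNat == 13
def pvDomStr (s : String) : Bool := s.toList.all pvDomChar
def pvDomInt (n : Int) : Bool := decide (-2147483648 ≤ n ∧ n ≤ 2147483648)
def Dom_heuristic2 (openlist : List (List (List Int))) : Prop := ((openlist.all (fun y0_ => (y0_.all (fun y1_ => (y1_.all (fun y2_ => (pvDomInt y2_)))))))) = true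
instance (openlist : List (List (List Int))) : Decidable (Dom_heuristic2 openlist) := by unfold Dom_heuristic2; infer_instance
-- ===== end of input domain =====

-- B replaces A's Position list, quadruple index scans and openlist.index with a single pass per node
-- maintaining a sorted prefix (online insertion inversion count) and an enumerate counter: measurably faster.


-- ===== PORT A =====
-- Position(character,row,column) is ported as the triple (character, row, column);
-- distinct Position objects carry distinct (row,column), so Python's identity-based
-- list.index coincides with value-based PySem.List.index? on these triples.
def matrixToPosition (puzzle : List (List Int)) : List (Int × Int × Int) :=
  let rows : Int := puzzle.length
  let columns : Int := (((PySem.List.pyGet? puzzle 0).getD []).length : Int)  -- len(puzzle[0]); [] excluded by Pre_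
  (PySem.List.pyRange 0 rows 1).foldl (fun poslist row =>
    (PySem.List.pyRange 0 columns 1).foldl (fun poslist column =>
      poslist ++ [((PySem.List.pyGet? ((PySem.List.pyGet? puzzle row).getD []) column).getD 0, row, column)])
      poslist) []

def heuristic2 (openlist : List (List (List Int))) : Int :=
  (openlist.foldl (fun (st : Int × Int) node =>
    let pl := matrixToPosition node
    let sum : Int := pl.foldl (fun sum ec =>
      pl.foldl (fun sum en =>
        if (((PySem.List.index? pl en).getD 0 : Nat) : Int) > (((PySem.List.index? pl ec).getD 0 : Nat) : Int)
            ∧ ec.1 > en.1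
        then sum + 1 else sum) sum) 0
    if st.2 > sum then ((((PySem.List.index? openlist node).getD 0 : Nat) : Int), sum) else st)
    (0, 10000)).1

-- ===== PORT B =====
-- _insert_count(seen, x): scan the ascending list, insert x before the first y > x,
-- return the remaining length as the number of seen elements greater than x.
def insertCount (seen : List Int) (x : Int) : List Int × Int :=
  match seen with
  | [] => (seen ++ [x], 0)
  | y :: ys =>
    if y > x then (x :: y :: ys, ((y :: ys).length : Int))
    else
      let r := insertCount ys x
      (y :: r.1, r.2)

def heuristic2_alt (openlist : List (List (List Int))) : Int :=
  (openlist.foldl (fun (st : Int × Int × Int) node =>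
    let i := st.1
    let width : Int := (((PySem.List.pyGet? node 0).getD []).length : Int)  -- len(node[0]); [] excluded by Pre_
    let inv_seen := node.foldl (fun (p : Int × List Int) row =>
      (PySem.List.pyRange 0 width 1).foldl (fun (p : Int × List Int) c =>
        let q := insertCount p.2 ((PySem.List.pyGet? row c).getD 0)
        (p.1 + q.2, q.1)) p) (0, [])
    if inv_seen.1 < st.2.2 then (i + 1, i, inv_seen.1) else (i + 1, st.2.1, st.2.2))
    (0, 0, 10000)).2.1

-- ===== PRECONDITION & SPEC =====
-- Pre_ excludes exactly the inputs on which A raises IndexError: a node that is the empty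
-- list (len(puzzle[0])), or a node with a row shorter than its first row (puzzle[row][column]).
def Pre_heuristic2 (openlist : List (List (List Int))) : Prop :=
  ∀ node ∈ openlist, node ≠ [] ∧ ∀ row ∈ node, (node.headD []).length ≤ row.length
instance (openlist : List (List (List Int))) : Decidable (Pre_heuristic2 openlist) := by
  unfold Pre_heuristic2; infer_instance
def pvWitness_heuristic2 : List (List (List Int)) := [[[1, 2], [3, 0]], [[0, 1], [2, 3]]]
def Spec_heuristic2 (openlist : List (List (List Int))) (out : Int) : Prop := out = heuristic2_alt openlist
instance (openlist : List (List (List Int))) (out : Int) : Decidable (Spec_heuristic2 openlist out) := by unfold Spec_heuristic2; infer_instance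

-- ===== CLAIM (what is proved, stated in full; the proofs are below) =====
def Claim_equal_heuristic2 : Prop := ∀ (openlist : List (List (List Int))), Dom_heuristic2 openlist → Pre_heuristic2 openlist → Spec_heuristic2 openlist (heuristic2 openlist)

-- ===== LEMMAS AND PROOFS =====

-- number of inversions of a flat list: pairs i < j with l[i] > l[j], grouped by the left index
def invN : List Int → Nat
  | [] => 0
  | x :: xs => xs.countP (fun y => decide (y < x)) + invN xs

-- each node read as A reads it: every row truncated to the width given by the first row
def tflat (node : List (List Int)) : List Int :=
  (node.map (fun row => row.take (node.headD []).length)).flatten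

-- A's per-node sum, named for the proofs (definitionally the inner double loop of the port)
def sumA (node : List (List Int)) : Int :=
  let pl := matrixToPosition node
  pl.foldl (fun sum ec =>
    pl.foldl (fun sum en =>
      if (((PySem.List.index? pl en).getD 0 : Nat) : Int) > (((PySem.List.index? pl ec).getD 0 : Nat) : Int)
          ∧ ec.1 > en.1
      then sum + 1 else sum) sum) 0

-- B's per-node inversion count, named for the proofs
def invB (node : List (List Int)) : Int :=
  (node.foldl (fun (p : Int × List Int) row =>
    (PySem.List.pyRange 0 (((PySem.List.pyGet? node 0).getD []).length : Int) 1).foldl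
      (fun (p : Int × List Int) c =>
        let q := insertCount p.2 ((PySem.List.pyGet? row c).getD 0)
        (p.1 + q.2, q.1)) p) (0, [])).1

lemma heuristic2_eq_foldl (openlist : List (List (List Int))) :
    heuristic2 openlist =
      (openlist.foldl (fun (st : Int × Int) node =>
        if st.2 > sumA node
        then ((((PySem.List.index? openlist node).getD 0 : Nat) : Int), sumA node) else st)
        (0, 10000)).1 := rfl

lemma heuristic2_alt_eq_foldl (openlist : List (List (List Int))) :
    heuristic2_alt openlist =
      (openlist.foldl (fun (st : Int × Int × Int) node =>
        if invB node < st.2.2 then (st.1 + 1, st.1, invB node) else (st.1 + 1, st.2.1, st.2.2))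
        (0, 0, 10000)).2.1 := rfl

-- ---------- generic range/getD bridges ----------

lemma map_eq_map_range {α β : Type} (f : α → β) (d : α) (l : List α) :
    l.map f = (List.range l.length).map (fun k => f (l.getD k d)) := by
  induction l with
  | nil => simp
  | cons x xs ih =>
    simp only [List.map_cons, List.length_cons, List.range_succ_eq_map, List.map_map]
    refine congrArg₂ _ rfl ?_
    rw [ih]
    simp [Function.comp]


lemma countP_eq_countP_range {α : Type} (p : α → Bool) (d : α) (l : List α) :
    l.countP p = (List.range l.length).countP (fun k => p (l.getD k d)) := by
  induction l with
  | cons x xs ih => ?_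
  | nil => simp
  simp only [List.countP_cons, List.length_cons, List.range_succ_eq_map, List.countP_map]
  rw [ih]
  simp [Function.comp_def, Nat.add_comm]



-- ---------- matrixToPosition characterisation ----------

def mtpS (puzzle : List (List Int)) : List (Int × Int × Int) :=
  (List.range puzzle.length).flatMap (fun r =>
    (List.range ((puzzle.headD []).length)).map (fun c =>
      ((puzzle.getD r []).getD c 0, (r : Int), (c : Int))))

lemma matrixToPosition_eq (puzzle : List (List Int)) :
    matrixToPosition puzzle = mtpS puzzle := by
  unfold matrixToPosition mtpS
  simp only [PySem.List.foldl_append_singleton_eq_map, PySem.List.foldl_append_eq_flatMap,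
    List.nil_append, PySem.List.pyRange_zero_natCast, List.flatMap_def, List.map_map,
    Function.comp_def, PySem.List.pyGet?_natCast, PySem.List.pyGet?_zero,
    ← List.getD_eq_getElem?_getD]
  have h0 : puzzle.getD 0 [] = puzzle.headD [] := by cases puzzle <;> simp
  rw [h0]

lemma map_getD_range_take (l : List Int) (w : Nat) (h : w ≤ l.length) :
    (List.range w).map (fun c => l.getD c 0) = l.take w := by
  apply List.ext_getElem
  · simp [h]
  · intro i h1 h2
    have hi : i < l.length := lt_of_lt_of_le (by simpa using h1) h
    simp [List.getElem_take, List.getElem?_eq_getElem hi]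

lemma mtpS_nodup (puzzle : List (List Int)) : (mtpS puzzle).Nodup := by
  have : ((mtpS puzzle).map (fun e => e.2)).Nodup := by
    unfold mtpS
    rw [List.map_flatMap]
    rw [List.nodup_flatMap]
    constructor
    · intro r _
      simp only [List.map_map]
      refine List.Nodup.map ?_ (List.nodup_range)
      intro a b h
      simpa using h
    · refine List.Pairwise.imp ?_ (List.pairwise_lt_range)
      intro a b hab
      simp only [Function.onFun, List.disjoint_left]
      intro p hp hq
      simp only [List.map_map, List.mem_map] at hp hq
      obtain ⟨c1, _, rfl⟩ := hp
      obtain ⟨c2, _, h⟩ := hq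
      simp only [Function.comp, Prod.mk.injEq] at h
      omega
  exact this.of_map _


lemma mtpS_map_fst (puzzle : List (List Int))
    (hrect : ∀ row ∈ puzzle, (puzzle.headD []).length ≤ row.length) :
    (mtpS puzzle).map (·.1) = tflat puzzle := by
  unfold mtpS tflat
  rw [List.map_flatMap]
  have hinner : ∀ r ∈ List.range puzzle.length,
      ((List.range (puzzle.headD []).length).map (fun c => ((puzzle.getD r []).getD c 0, (r:Int), (c:Int)))).map (·.1)
      = (puzzle.getD r []).take (puzzle.headD []).length := by
    intro r hr
    simp only [List.map_map]
    have hm : puzzle.getD r [] ∈ puzzle := by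
      rw [List.getD_eq_getElem _ _ (by simpa using hr)]
      exact List.getElem_mem _
    have := map_getD_range_take (puzzle.getD r []) _ (hrect _ hm)
    simpa [Function.comp_def] using this
  calc ((List.range puzzle.length).map
          (fun r => ((List.range (puzzle.headD []).length).map (fun c => ((puzzle.getD r []).getD c 0, (r:Int), (c:Int)))).map (·.1))).flatten
      = ((List.range puzzle.length).map (fun r => (puzzle.getD r []).take (puzzle.headD []).length)).flatten := by
        rw [List.map_congr_left hinner]
    _ = (puzzle.map (fun row => row.take (puzzle.headD []).length)).flatten := by
        rw [← map_eq_map_range (fun row => row.take (puzzle.headD []).length) [] puzzle]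

lemma index?_getElem_of_nodup {α : Type} [BEq α] [LawfulBEq α] (l : List α) (hl : l.Nodup)
    (k : Nat) (hk : k < l.length) : PySem.List.index? l l[k] = some k := by
  rw [PySem.List.index?_eq_some_iff]
  refine ⟨l.take k, l.drop (k+1), ?_, by simp [hk.le], ?_⟩
  · conv_lhs => rw [← List.take_append_drop k l]
    rw [List.drop_eq_getElem_cons hk]
  · intro hmem
    obtain ⟨j, hj, hje⟩ := List.mem_iff_getElem.mp hmem
    have hjk : j < k := by simp at hj; omega
    have : l[j]'(by omega) = l[k] := by
      simpa [List.getElem_take] using hje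
    exact absurd (List.Nodup.getElem_inj_iff hl |>.mp this) (by omega)


-- ---------- A's double loop counts inversions ----------

lemma sum_range_pair (c : List Int) :
    ((List.range c.length).map (fun (k : Nat) =>
      (((List.range c.length).countP (fun (j : Nat) => decide ((k : Int) < (j : Int) ∧ c.getD j 0 < c.getD k 0))) : Int))).sum
    = (invN c : Int) := by
  induction c with
  | nil => simp [invN]
  | cons x xs ih =>
    simp only [List.length_cons, List.range_succ_eq_map, List.map_cons, List.map_map,
      List.sum_cons, invN, Nat.cast_zero]
    have h0 : ((List.countP (fun (j : Nat) => decide ((0 : Int) < (j : Int) ∧ (x :: xs).getD j 0 < (x :: xs).getD 0 0))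
        (0 :: (List.range xs.length).map Nat.succ) : Nat) : Int)
        = (xs.countP (fun y => decide (y < x)) : Int) := by
      rw [List.countP_cons]
      simp only [List.countP_map]
      rw [countP_eq_countP_range (fun y => decide (y < x)) 0 xs]
      norm_num
      refine List.countP_congr (fun j hj => ?_)
      simp [Function.comp]
    have h1 : ∀ (i : Nat), i ∈ List.range xs.length →
        ((List.countP (fun (j : Nat) => decide (((Nat.succ i : Nat) : Int) < (j : Int) ∧ (x :: xs).getD j 0 < (x :: xs).getD (Nat.succ i) 0))
          (0 :: (List.range xs.length).map Nat.succ) : Nat) : Int)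
        = ((List.countP (fun (j : Nat) => decide ((i : Int) < (j : Int) ∧ xs.getD j 0 < xs.getD i 0)) (List.range xs.length) : Nat) : Int) := by
      intro i _
      rw [List.countP_cons]
      simp only [List.countP_map]
      norm_num
      refine List.countP_congr (fun j hj => ?_)
      simp [Function.comp]
    rw [h0]
    have h2 : ((List.range xs.length).map ((fun (k : Nat) =>
        ((List.countP (fun (j : Nat) => decide ((k : Int) < (j : Int) ∧ (x :: xs).getD j 0 < (x :: xs).getD k 0))
          (0 :: (List.range xs.length).map Nat.succ) : Nat) : Int)) ∘ Nat.succ)).sum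
        = ((List.range xs.length).map (fun (i : Nat) =>
          ((List.countP (fun (j : Nat) => decide ((i : Int) < (j : Int) ∧ xs.getD j 0 < xs.getD i 0)) (List.range xs.length) : Nat) : Int))).sum := by
      refine congrArg _ (List.map_congr_left ?_)
      intro i hi
      simpa [Function.comp] using h1 i hi
    rw [h2, ih]
    push_cast
    ring


lemma Acount_eq_S (pl : List (Int × Int × Int)) (h : pl.Nodup) :
    pl.foldl (fun sum ec =>
      pl.foldl (fun sum en =>
        if (((PySem.List.index? pl en).getD 0 : Nat) : Int) > (((PySem.List.index? pl ec).getD 0 : Nat) : Int)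
            ∧ ec.1 > en.1
        then sum + 1 else sum) sum) (0 : Int)
    = ((List.range (pl.map (·.1)).length).map (fun (k : Nat) =>
        (((List.range (pl.map (·.1)).length).countP (fun (j : Nat) =>
          decide ((k : Int) < (j : Int) ∧ (pl.map (·.1)).getD j 0 < (pl.map (·.1)).getD k 0))) : Int))).sum := by
  simp only [PySem.List.foldl_ite_add_one, PySem.List.foldl_add, List.length_map, zero_add]
  -- now: (pl.map g).sum = RHS
  rw [map_eq_map_range _ ((0 : Int), (0 : Int), (0 : Int)) pl]
  refine congrArg _ (List.map_congr_left (fun k hk => ?_))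
  have hkn : k < pl.length := List.mem_range.mp hk
  rw [List.getD_eq_getElem _ _ hkn]
  rw [countP_eq_countP_range _ ((0 : Int), (0 : Int), (0 : Int)) pl]
  refine congrArg _ (List.countP_congr (fun j hj => ?_))
  have hjn : j < pl.length := List.mem_range.mp hj
  rw [List.getD_eq_getElem _ _ hjn]
  rw [index?_getElem_of_nodup pl h k hkn, index?_getElem_of_nodup pl h j hjn]
  have hc1 : (List.map (fun x => x.1) pl).getD j 0 = pl[j].1 := by
    rw [List.getD_eq_getElem _ _ (by simpa using hjn)]
    simp
  have hc2 : (List.map (fun x => x.1) pl).getD k 0 = pl[k].1 := by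
    rw [List.getD_eq_getElem _ _ (by simpa using hkn)]
    simp
  rw [hc1, hc2]
  simp only [Option.getD_some]
  constructor <;> intro hx <;> simp at hx ⊢ <;> exact ⟨by exact_mod_cast hx.1, hx.2⟩

lemma sumA_eq (node : List (List Int))
    (hrect : ∀ row ∈ node, (node.headD []).length ≤ row.length) :
    sumA node = (invN (tflat node) : Int) := by
  unfold sumA
  simp only [matrixToPosition_eq]
  rw [Acount_eq_S (mtpS node) (mtpS_nodup node)]
  rw [mtpS_map_fst node hrect]
  exact sum_range_pair (tflat node)

-- ---------- B's pass counts inversions ----------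

lemma insertCount_snd (seen : List Int) (x : Int) (hs : seen.Pairwise (· ≤ ·)) :
    (insertCount seen x).2 = (seen.countP (fun y => decide (x < y)) : Int) := by
  induction seen with
  | nil => simp [insertCount]
  | cons y ys ih =>
    rw [List.pairwise_cons] at hs
    unfold insertCount
    by_cases hxy : y > x
    · simp only [if_pos hxy]
      have hall : ∀ z ∈ y :: ys, x < z := by
        intro z hz
        rcases List.mem_cons.mp hz with rfl | hz
        · exact hxy
        · exact lt_of_lt_of_le hxy (hs.1 z hz)
      have : (y :: ys).countP (fun y => decide (x < y)) = (y :: ys).length := by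
        rw [List.countP_eq_length]
        intro z hz
        simpa using hall z hz
      rw [this]
    · simp only [if_neg hxy]
      rw [ih hs.2, List.countP_cons]
      simp at hxy
      simp [not_lt.mpr hxy]


lemma insertCount_perm (seen : List Int) (x : Int) :
    (insertCount seen x).1.Perm (x :: seen) := by
  induction seen with
  | nil => simp [insertCount]
  | cons y ys ih =>
    unfold insertCount
    by_cases hxy : y > x
    · simp [if_pos hxy]
    · simp only [if_neg hxy]
      exact (List.Perm.cons y ih).trans (List.Perm.swap x y ys)


lemma insertCount_sorted (seen : List Int) (x : Int) (hs : seen.Pairwise (· ≤ ·)) :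
    (insertCount seen x).1.Pairwise (· ≤ ·) := by
  induction seen with
  | nil => simp [insertCount]
  | cons y ys ih =>
    rw [List.pairwise_cons] at hs
    unfold insertCount
    by_cases hxy : y > x
    · simp only [if_pos hxy]
      rw [List.pairwise_cons]
      refine ⟨?_, List.pairwise_cons.mpr hs⟩
      intro z hz
      rcases List.mem_cons.mp hz with rfl | hz
      · exact le_of_lt hxy
      · exact le_of_lt (lt_of_lt_of_le hxy (hs.1 z hz))
    · simp only [if_neg hxy]
      rw [List.pairwise_cons]
      refine ⟨?_, ih hs.2⟩
      intro z hz
      have hz' := (insertCount_perm ys x).mem_iff.mp hz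
      rcases List.mem_cons.mp hz' with rfl | hz'
      · exact le_of_not_gt hxy
      · exact hs.1 z hz'


lemma foldl_insertCount (l : List Int) :
    ∀ (seen : List Int) (acc : Int), seen.Pairwise (· ≤ ·) →
    (l.foldl (fun (p : Int × List Int) x =>
      let q := insertCount p.2 x
      (p.1 + q.2, q.1)) (acc, seen)).1
    = acc + (invN l : Int) + ((l.map (fun x => (seen.countP (fun y => decide (x < y)) : Int))).sum) := by
  induction l with
  | nil => intro seen acc _; simp [invN]
  | cons x xs ih =>
    intro seen acc hs
    simp only [List.foldl_cons]
    rw [ih ((insertCount seen x).1) (acc + (insertCount seen x).2) (insertCount_sorted seen x hs)]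
    rw [insertCount_snd seen x hs]
    have hcross : ∀ z : Int, ((insertCount seen x).1.countP (fun y => decide (z < y)) : Int)
        = ((x :: seen).countP (fun y => decide (z < y)) : Int) := by
      intro z
      exact_mod_cast (insertCount_perm seen x).countP_eq (fun y => decide (z < y))
    have hmap : xs.map (fun z => (((insertCount seen x).1.countP (fun y => decide (z < y)) : Nat) : Int))
        = xs.map (fun z => (((x :: seen).countP (fun y => decide (z < y)) : Nat) : Int)) :=
      List.map_congr_left (fun z _ => hcross z)
    rw [hmap]
    simp only [List.countP_cons, invN]
    push_cast
    have hsum : (xs.map (fun z => ((seen.countP (fun y => decide (z < y)) : Nat) : Int) + (if decide (z < x) = true then 1 else 0))).sum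
        = (xs.map (fun z => ((seen.countP (fun y => decide (z < y)) : Nat) : Int))).sum + (xs.countP (fun z => decide (z < x)) : Int) := by
      rw [← PySem.List.sum_map_ite_one_zero (fun z => decide (z < x)) xs]
      rw [← List.sum_map_add]
    rw [hsum]
    simp only [List.map_cons, List.sum_cons]
    ring


lemma invB_eq (node : List (List Int))
    (hrect : ∀ row ∈ node, (node.headD []).length ≤ row.length) :
    invB node = (invN (tflat node) : Int) := by
  unfold invB tflat
  have h0 : (PySem.List.pyGet? node 0).getD [] = node.headD [] := by
    cases node <;> simp [PySem.List.pyGet?_zero]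
  simp only [h0, PySem.List.pyRange_zero_natCast, List.foldl_map, PySem.List.pyGet?_natCast,
    ← List.getD_eq_getElem?_getD]
  have hrow : ∀ (p : Int × List Int) (row : List Int), row ∈ node →
      (List.range (node.headD []).length).foldl
        (fun (p : Int × List Int) c =>
          (p.1 + (insertCount p.2 (row.getD c 0)).2, (insertCount p.2 (row.getD c 0)).1)) p
      = (row.take (node.headD []).length).foldl
          (fun (p : Int × List Int) x => (p.1 + (insertCount p.2 x).2, (insertCount p.2 x).1)) p := by
    intro p row hrowmem
    rw [← map_getD_range_take row _ (hrect row hrowmem), List.foldl_map]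
  have hcong : (node.foldl (fun (p : Int × List Int) row =>
      List.foldl (fun (p : Int × List Int) c =>
        (p.1 + (insertCount p.2 (row.getD c 0)).2, (insertCount p.2 (row.getD c 0)).1)) p
        (List.range (node.headD []).length)) ((0 : Int), ([] : List Int)))
      = node.foldl (fun (p : Int × List Int) row =>
        List.foldl (fun (p : Int × List Int) x =>
          (p.1 + (insertCount p.2 x).2, (insertCount p.2 x).1)) p
          (List.take (node.headD []).length row)) ((0 : Int), ([] : List Int)) :=
    PySem.List.foldl_congr_mem node _ _ _ (fun p row h => hrow p row h)
  rw [hcong]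
  have hfm : (List.foldl (fun (p : Int × List Int) row =>
        List.foldl (fun (p : Int × List Int) x => (p.1 + (insertCount p.2 x).2, (insertCount p.2 x).1)) p
          (List.take (node.headD []).length row)) ((0 : Int), ([] : List Int)) node)
      = List.foldl (fun (p : Int × List Int) row =>
          List.foldl (fun (p : Int × List Int) x => (p.1 + (insertCount p.2 x).2, (insertCount p.2 x).1)) p row)
        ((0 : Int), ([] : List Int)) (node.map (List.take (node.headD []).length)) :=
    List.foldl_map.symm
  rw [hfm, ← List.foldl_flatten]
  have hic := foldl_insertCount ((node.map (List.take (node.headD []).length)).flatten) [] 0 (by simp)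
  simp only [] at hic
  rw [hic]
  have hz : (List.map (fun (x : Int) => ((([] : List Int).countP (fun y => decide (x < y)) : Nat) : Int))
      ((node.map (List.take (node.headD []).length)).flatten)).sum = 0 := by
    generalize (node.map (List.take (node.headD []).length)).flatten = L
    induction L with
    | nil => simp
    | cons r rs ih => simp
  rw [hz]
  simp

-- ---------- the outer arg-min loops agree ----------

lemma outer_eq (full : List (List (List Int)))
    (h : ∀ y ∈ full, sumA y = invB y) :
    ∀ (suf pre : List (List (List Int))) (idx m : Int),
      full = pre ++ suf →
      (∀ y ∈ pre, m ≤ invB y) →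
      (suf.foldl (fun (st : Int × Int) node =>
        if st.2 > sumA node
        then ((((PySem.List.index? full node).getD 0 : Nat) : Int), sumA node) else st)
        (idx, m)).1
      = (suf.foldl (fun (st : Int × Int × Int) node =>
          if invB node < st.2.2 then (st.1 + 1, st.1, invB node) else (st.1 + 1, st.2.1, st.2.2))
          ((pre.length : Int), idx, m)).2.1 := by
  intro suf
  induction suf with
  | nil => intro pre idx m _ _; simp
  | cons x suf' ih =>
    intro pre idx m hfull hinv
    have hx : x ∈ full := by rw [hfull]; simp
    simp only [List.foldl_cons]
    rw [h x hx]
    by_cases hlt : invB x < m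
    · rw [if_pos (by simpa using hlt), if_pos hlt]
      have hxnotpre : x ∉ pre := by
        intro hmem
        exact absurd (hinv x hmem) (not_le.mpr hlt)
      have hidx : PySem.List.index? full x = some pre.length := by
        rw [PySem.List.index?_eq_some_iff]
        exact ⟨pre, suf', hfull, rfl, hxnotpre⟩
      rw [hidx]
      have := ih (pre ++ [x]) (pre.length : Int) (invB x)
        (by rw [hfull]; simp)
        (by intro y hy
            rcases List.mem_append.mp hy with hy | hy
            · exact le_of_lt (lt_of_lt_of_le hlt (hinv y hy))
            · simp at hy; subst hy; exact le_refl _)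
      simpa using this
    · rw [if_neg (by simpa using hlt), if_neg hlt]
      have := ih (pre ++ [x]) idx m
        (by rw [hfull]; simp)
        (by intro y hy
            rcases List.mem_append.mp hy with hy | hy
            · exact hinv y hy
            · simp at hy; subst hy; exact not_lt.mp hlt)
      simpa using this

-- ===== VERDICT (by name: the statement is the Claim_ definition above) =====
theorem heuristic2_spec : Claim_equal_heuristic2 := by
  intro openlist _hdom hpre
  unfold Spec_heuristic2
  rw [heuristic2_eq_foldl, heuristic2_alt_eq_foldl]
  have h : ∀ y ∈ openlist, sumA y = invB y := by
    intro y hy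
    obtain ⟨-, hrect⟩ := hpre y hy
    rw [sumA_eq y hrect, invB_eq y hrect]
  exact outer_eq openlist h openlist [] 0 10000 rfl (by simp)
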